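-- pv_equiv track=rewrite | github.com/avg16/cp-dsa | codeforces/phone_numbers.py | divide_phone_number
-- ===== SOURCE A (Python) =====
-- def divide_phone_number(n, phone_number):
--     groups = []
--     i = 0
--
--     while i < n:
--         remaining = n - i
--         if remaining == 4:
--             groups.append(phone_number[i:i + 2])
--             groups.append(phone_number[i + 2:i + 4])
--             break
--         elif remaining >= 3:
--             groups.append(phone_number[i:i + 3])
--             i += 3
--         else:
--             groups.append(phone_number[i:i + 2])
--             i += 2
--
--     return "-".join(groups)
-- ===== SOURCE B (Python) =====
-- def divide_phone_number(n, phone_number):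
--     if n <= 0:
--         return ""
--     if n % 3 == 0:
--         t, w = n // 3, 0
--     elif n % 3 == 2:
--         t, w = (n - 2) // 3, 1
--     elif n == 1:
--         t, w = 0, 1
--     else:
--         t, w = (n - 4) // 3, 2
--     pieces = [phone_number[3 * j:3 * j + 3] for j in range(t)]
--     base = 3 * t
--     pieces += [phone_number[base + 2 * j:base + 2 * j + 2] for j in range(w)]
--     return "-".join(pieces)
-- ===== Notes on version B (the rewrite author's own statement) =====
-- stated objective: alternative
-- what changed: Replaces the greedy while-loop with break/branches by a closed-form arithmetic computation of the group-size schedule (number of 3-groups and trailing 2-slices from n mod 3) followed by direct slicing at computed offsets via comprehensions.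
import Mathlib
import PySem

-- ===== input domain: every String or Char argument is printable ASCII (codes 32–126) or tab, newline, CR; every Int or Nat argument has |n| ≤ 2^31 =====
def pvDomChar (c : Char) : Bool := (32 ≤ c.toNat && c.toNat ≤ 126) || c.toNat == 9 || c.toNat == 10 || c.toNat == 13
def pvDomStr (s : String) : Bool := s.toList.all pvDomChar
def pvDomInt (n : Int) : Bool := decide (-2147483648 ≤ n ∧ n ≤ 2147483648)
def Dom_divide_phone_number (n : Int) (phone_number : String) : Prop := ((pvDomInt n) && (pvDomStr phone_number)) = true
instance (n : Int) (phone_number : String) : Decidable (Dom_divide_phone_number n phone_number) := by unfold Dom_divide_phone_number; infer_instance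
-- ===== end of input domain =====

-- B replaces A's greedy while-loop by an arithmetic (threes, twos) schedule plus direct slicing; same cost, different decomposition.

-- ===== PORT A =====
-- the while-loop: state (i, groups); Python's phone_number[a:b] is PySem.Str.slice
def pvALoop (n : Int) (phone_number : String) (i : Int) (groups : List String) : List String :=
  if i < n then
    let remaining := n - i
    if remaining = 4 then
      (groups ++ [PySem.Str.slice phone_number (some i) (some (i + 2))])
        ++ [PySem.Str.slice phone_number (some (i + 2)) (some (i + 4))]
    else if 3 ≤ remaining then
      pvALoop n phone_number (i + 3) (groups ++ [PySem.Str.slice phone_number (some i) (some (i + 3))])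
    else
      pvALoop n phone_number (i + 2) (groups ++ [PySem.Str.slice phone_number (some i) (some (i + 2))])
  else groups
termination_by (n - i).toNat
decreasing_by all_goals omega

def divide_phone_number (n : Int) (phone_number : String) : String :=
  PySem.Str.join "-" (pvALoop n phone_number 0 [])

-- ===== PORT B =====
def divide_phone_number_alt (n : Int) (phone_number : String) : String :=
  if n ≤ 0 then "" else
  let tw : Int × Int :=
    if PySem.Int.mod n 3 = 0 then (PySem.Int.floordiv n 3, 0)
    else if PySem.Int.mod n 3 = 2 then (PySem.Int.floordiv (n - 2) 3, 1)
    else if n = 1 then (0, 1)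
    else (PySem.Int.floordiv (n - 4) 3, 2)
  let t := tw.1
  let w := tw.2
  let pieces := (PySem.List.pyRange 0 t 1).map
    (fun j => PySem.Str.slice phone_number (some (3 * j)) (some (3 * j + 3)))
  let base := 3 * t
  let pieces := pieces ++ (PySem.List.pyRange 0 w 1).map
    (fun j => PySem.Str.slice phone_number (some (base + 2 * j)) (some (base + 2 * j + 2)))
  PySem.Str.join "-" pieces

-- ===== PRECONDITION & SPEC =====
def Spec_divide_phone_number (n : Int) (phone_number : String) (out : String) : Prop := out = divide_phone_number_alt n phone_number
instance (n : Int) (phone_number : String) (out : String) : Decidable (Spec_divide_phone_number n phone_number out) := by unfold Spec_divide_phone_number; infer_instance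

-- ===== CLAIM (what is proved, stated in full; the proofs are below) =====
def Claim_equal_divide_phone_number : Prop := ∀ (n : Int) (phone_number : String), Dom_divide_phone_number n phone_number → Spec_divide_phone_number n phone_number (divide_phone_number n phone_number)

-- ===== LEMMAS AND PROOFS =====

-- number of 3-groups / trailing 2-slices the schedule has for remaining length r
def pvT (r : Int) : Nat :=
  (if r ≤ 0 then 0 else if r % 3 = 0 then r / 3 else if r % 3 = 2 then (r - 2) / 3
   else if r = 1 then 0 else (r - 4) / 3).toNat
def pvW (r : Int) : Nat :=
  if r ≤ 0 then 0 else if r % 3 = 0 then 0 else if r % 3 = 2 then 1 else if r = 1 then 1 else 2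

def pvPieces (s : String) (n i : Int) : List String :=
  (List.range (pvT (n - i))).map
    (fun (j : Nat) => PySem.Str.slice s (some (i + 3 * (j : Int))) (some (i + 3 * (j : Int) + 3)))
  ++ (List.range (pvW (n - i))).map
    (fun (j : Nat) => PySem.Str.slice s (some (i + 3 * (pvT (n - i) : Int) + 2 * (j : Int)))
                                (some (i + 3 * (pvT (n - i) : Int) + 2 * (j : Int) + 2)))

lemma slice_congr (s : String) (a b a' b' : Int) (ha : a = a') (hb : b = b') :
    PySem.Str.slice s (some a) (some b) = PySem.Str.slice s (some a') (some b') := by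
  rw [ha, hb]

lemma pvT_step (r : Int) (h3 : 3 ≤ r) (h4 : r ≠ 4) : pvT r = pvT (r - 3) + 1 := by
  unfold pvT; split_ifs <;> omega

lemma pvW_step (r : Int) (h3 : 3 ≤ r) (h4 : r ≠ 4) : pvW r = pvW (r - 3) := by
  unfold pvW; split_ifs <;> omega

lemma pvALoop_eq_aux (n : Int) (s : String) : ∀ (m : Nat) (i : Int) (g : List String),
    (n - i).toNat ≤ m → pvALoop n s i g = g ++ pvPieces s n i := by
  intro m
  induction m with
  | zero =>
    intro i g hm
    have h : ¬ i < n := by omega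
    rw [pvALoop]
    have hT : pvT (n - i) = 0 := by unfold pvT; split_ifs <;> omega
    have hW : pvW (n - i) = 0 := by unfold pvW; split_ifs <;> omega
    simp [h, pvPieces, hT, hW]
  | succ m ih =>
    intro i g hm
    rw [pvALoop]
    by_cases h : i < n
    · simp only [h, if_pos]
      by_cases h4 : n - i = 4
      · have hT : pvT (n - i) = 0 := by unfold pvT; split_ifs <;> omega
        have hW : pvW (n - i) = 2 := by unfold pvW; split_ifs <;> omega
        rw [if_pos h4, pvPieces, hT, hW, List.append_assoc]
        simp only [List.range_zero, List.map_nil, List.nil_append,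
          show List.range 2 = [0, 1] by rfl, List.map_cons, List.map_nil]
        congr 1
        simp only [List.singleton_append, List.cons.injEq, and_true]
        exact ⟨slice_congr s _ _ _ _ (by push_cast; ring) (by push_cast; ring),
               slice_congr s _ _ _ _ (by push_cast; ring) (by push_cast; ring)⟩
      · by_cases h3 : 3 ≤ n - i
        · simp only [if_neg h4, if_pos h3]
          rw [ih (i + 3) _ (by omega)]
          suffices hp : pvPieces s n i =
              PySem.Str.slice s (some i) (some (i + 3)) :: pvPieces s n (i + 3) by
            rw [hp, List.append_assoc, List.singleton_append]
          unfold pvPieces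
          rw [show n - (i + 3) = (n - i) - 3 by ring, pvT_step _ h3 h4, pvW_step _ h3 h4,
            List.range_succ_eq_map]
          simp only [List.map_cons, List.map_map, List.cons_append]
          congr 1
          · exact slice_congr s _ _ _ _ (by push_cast; ring) (by push_cast; ring)
          · congr 1
            · apply List.map_congr_left; intro j _
              simp only [Function.comp_apply]
              exact slice_congr s _ _ _ _ (by push_cast; ring) (by push_cast; ring)
            · apply List.map_congr_left; intro j _
              exact slice_congr s _ _ _ _ (by push_cast; ring) (by push_cast; ring)
        · simp only [if_neg h4, if_neg h3]
          rw [ih (i + 2) _ (by omega)]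
          have hT : pvT (n - i) = 0 := by unfold pvT; split_ifs <;> omega
          have hW : pvW (n - i) = 1 := by unfold pvW; split_ifs <;> omega
          have hT2 : pvT (n - (i + 2)) = 0 := by unfold pvT; split_ifs <;> omega
          have hW2 : pvW (n - (i + 2)) = 0 := by unfold pvW; split_ifs <;> omega
          simp only [pvPieces, hT, hW, hT2, hW2, List.range_zero, List.map_nil,
            List.nil_append, List.append_nil, List.range_one, List.map_cons,
            List.append_assoc, List.singleton_append]
          congr 2
          exact slice_congr s _ _ _ _ (by push_cast; ring) (by push_cast; ring)
    · have hT : pvT (n - i) = 0 := by unfold pvT; split_ifs <;> omega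
      have hW : pvW (n - i) = 0 := by unfold pvW; split_ifs <;> omega
      simp [h, pvPieces, hT, hW]

lemma alt_branch (s : String) (n t w : Int)
    (ht : t = (pvT n : Int)) (hw : w = (pvW n : Int)) :
    ((PySem.List.pyRange 0 t 1).map
        (fun j => PySem.Str.slice s (some (3 * j)) (some (3 * j + 3)))
      ++ (PySem.List.pyRange 0 w 1).map
        (fun j => PySem.Str.slice s (some (3 * t + 2 * j)) (some (3 * t + 2 * j + 2))))
      = pvPieces s n 0 := by
  subst ht hw
  unfold pvPieces
  rw [show n - 0 = n by ring, PySem.List.pyRange_one, PySem.List.pyRange_one]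
  simp only [Int.sub_zero, Int.toNat_natCast, List.map_map]
  congr 1
  · apply List.map_congr_left; intro j _
    simp only [Function.comp_apply]
    exact slice_congr s _ _ _ _ (by push_cast; ring) (by push_cast; ring)
  · apply List.map_congr_left; intro j _
    simp only [Function.comp_apply]
    exact slice_congr s _ _ _ _ (by push_cast; ring) (by push_cast; ring)

lemma alt_eq (n : Int) (s : String) :
    divide_phone_number_alt n s = PySem.Str.join "-" (pvPieces s n 0) := by
  unfold divide_phone_number_alt
  by_cases hn : n ≤ 0
  · have hT : pvT (n - 0) = 0 := by unfold pvT; split_ifs <;> omega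
    have hW : pvW (n - 0) = 0 := by unfold pvW; split_ifs <;> omega
    rw [if_pos hn]
    simp only [pvPieces, hT, hW, List.range_zero, List.map_nil, List.nil_append]
    decide
  · rw [if_neg hn]
    have h3 : (0:Int) < 3 := by omega
    dsimp only
    rw [PySem.Int.mod_eq_emod_of_pos h3]
    by_cases hm0 : n % 3 = 0
    · rw [if_pos hm0]
      dsimp only
      rw [PySem.Int.floordiv_eq_ediv_of_pos h3]
      congr 1
      refine alt_branch s n _ _ ?_ ?_ <;> · first
        | (unfold pvT; split_ifs <;> omega)
        | (unfold pvW; split_ifs <;> omega)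
    · rw [if_neg hm0]
      by_cases hm2 : n % 3 = 2
      · rw [if_pos hm2]
        dsimp only
        rw [PySem.Int.floordiv_eq_ediv_of_pos h3]
        congr 1
        refine alt_branch s n _ _ ?_ ?_ <;> · first
          | (unfold pvT; split_ifs <;> omega)
          | (unfold pvW; split_ifs <;> omega)
      · rw [if_neg hm2]
        by_cases h1 : n = 1
        · rw [if_pos h1]
          dsimp only
          congr 1
          refine alt_branch s n _ _ ?_ ?_ <;> · first
            | (unfold pvT; split_ifs <;> omega)
            | (unfold pvW; split_ifs <;> omega)
        · rw [if_neg h1]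
          dsimp only
          rw [PySem.Int.floordiv_eq_ediv_of_pos h3]
          congr 1
          refine alt_branch s n _ _ ?_ ?_ <;> · first
            | (unfold pvT; split_ifs <;> omega)
            | (unfold pvW; split_ifs <;> omega)

-- ===== VERDICT (by name: the statement is the Claim_ definition above) =====
theorem divide_phone_number_spec : Claim_equal_divide_phone_number := by
  intro n s _
  unfold Spec_divide_phone_number divide_phone_number
  rw [alt_eq, pvALoop_eq_aux n s (n - 0).toNat 0 [] (le_refl _)]
  simp
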